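-- pv_equiv track=rewrite | github.com/bhautik-pithadiya/Image-Transcibe | main.py | transform_list_of_dicts
-- ===== SOURCE A (Python) =====
-- def transform_list_of_dicts(data):
--     transformed_dict = {}
--
--     for entry in data:
--         for key, value in entry.items():
--             if key not in transformed_dict:
--                 transformed_dict[key] = []
--             transformed_dict[key].append(value)
--
--     return transformed_dict
-- ===== SOURCE B (Python) =====
-- def transform_list_of_dicts(data):
--     seen = set()
--     keys = []
--     for entry in data:
--         for key in entry:
--             if key not in seen:
--                 seen.add(key)
--                 keys.append(key)
--     return {key: [entry[key] for entry in data if key in entry] for key in keys}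
-- ===== Notes on version B (the rewrite author's own statement) =====
-- stated objective: alternative
-- what changed: A builds the grouped dict in a single pass appending each value as it is seen; B first collects the distinct keys in first-appearance order with a seen-set, then rescans the data once per key with a dict comprehension to build each value list.
import Mathlib
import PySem

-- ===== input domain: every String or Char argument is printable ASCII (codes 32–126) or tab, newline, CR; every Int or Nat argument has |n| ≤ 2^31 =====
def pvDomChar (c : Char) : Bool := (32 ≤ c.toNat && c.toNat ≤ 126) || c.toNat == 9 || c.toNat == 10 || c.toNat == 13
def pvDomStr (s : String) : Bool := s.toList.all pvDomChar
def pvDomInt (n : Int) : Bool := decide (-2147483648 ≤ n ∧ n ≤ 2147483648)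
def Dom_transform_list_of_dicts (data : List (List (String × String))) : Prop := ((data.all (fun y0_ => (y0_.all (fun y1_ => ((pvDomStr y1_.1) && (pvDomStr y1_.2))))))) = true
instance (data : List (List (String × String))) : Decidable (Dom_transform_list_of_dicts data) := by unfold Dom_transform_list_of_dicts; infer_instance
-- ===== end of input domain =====

-- B replaces A's single grouping pass by a key-collection pass plus a per-key rescan of the data (alternative decomposition; return value only, not faster).


-- ===== PORT A =====
def transform_list_of_dicts (data : List (List (String × String))) : List (String × List String) :=
  (data.foldl (fun td entry =>
      entry.foldl (fun td kv =>
        let td' := if td.contains kv.1 then td else td.insert kv.1 ([] : List String)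
        td'.modify kv.1 [] (fun l => l ++ [kv.2])) td)
    PySem.Dict.empty).items

-- ===== PORT B =====
def transform_list_of_dicts_alt (data : List (List (String × String))) : List (String × List String) :=
  let st := data.foldl (fun (st : PySem.Set String × List String) entry =>
      entry.foldl (fun st kv =>
        if PySem.Set.contains st.1 kv.1 then st
        else (PySem.Set.add st.1 kv.1, st.2 ++ [kv.1])) st) (PySem.Set.empty, [])
  st.2.map (fun k => (k, data.filterMap (fun entry => (PySem.Dict.mk entry).get? k)))

-- ===== PRECONDITION & SPEC =====
-- Pre_ states the dict invariant of the input encoding: each inner assoc list encodes a Python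
-- dict, so its keys are distinct; lists with a repeated key do not arise from any Python input.
def Pre_transform_list_of_dicts (data : List (List (String × String))) : Prop :=
  ∀ e ∈ data, (e.map Prod.fst).Nodup
instance (data : List (List (String × String))) : Decidable (Pre_transform_list_of_dicts data) := by unfold Pre_transform_list_of_dicts; infer_instance
def pvWitness_transform_list_of_dicts : (List (List (String × String))) :=
  [[("a", "1"), ("b", "2")], [("a", "3")]]

def Spec_transform_list_of_dicts (data : List (List (String × String))) (out : List (String × List String)) : Prop := out = transform_list_of_dicts_alt data
instance (data : List (List (String × String))) (out : List (String × List String)) : Decidable (Spec_transform_list_of_dicts data out) := by unfold Spec_transform_list_of_dicts; infer_instance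

-- ===== CLAIM (what is proved, stated in full; the proofs are below) =====
def Claim_equal_transform_list_of_dicts : Prop := ∀ (data : List (List (String × String))), Dom_transform_list_of_dicts data → Pre_transform_list_of_dicts data → Spec_transform_list_of_dicts data (transform_list_of_dicts data)

-- ===== LEMMAS AND PROOFS =====

-- A's two-step "setdefault then append" on one item equals a single modify with default [].
lemma stepA_eq_modify (td : PySem.Dict String (List String)) (k : String) (v : String) :
    (if td.contains k then td else td.insert k ([] : List String)).modify k [] (fun l => l ++ [v])
      = td.modify k [] (fun l => l ++ [v]) := by
  by_cases h : td.contains k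
  · simp [h]
  · have h' : td.contains k = false := by simpa using h
    simp only [h, Bool.false_eq_true, if_false,
      PySem.Dict.modify, PySem.Dict.getD_insert_self,
      PySem.Dict.getD_of_not_contains _ _ h', List.nil_append]
    apply PySem.Dict.ext
    rw [PySem.Dict.items_insert_of_contains _ _ (PySem.Dict.contains_insert_self _ _ _),
        PySem.Dict.items_insert_of_not_contains _ _ h',
        PySem.Dict.items_insert_of_not_contains _ _ h']
    simp only [List.map_append, List.map_cons, beq_self_eq_true, if_true, List.map_nil]
    congr 1
    simp only [PySem.Dict.contains, List.any_eq_false] at h'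
    apply (List.map_congr_left ?_).trans (List.map_id _)
    intro p hp
    simp [h' p hp]

-- A's result, characterised over the flattened item stream.
lemma portA_eq (data : List (List (String × String))) :
    transform_list_of_dicts data =
      (PySem.List.dedup (data.flatten.map Prod.fst)).map
        (fun k => (k, (data.flatten.filter (fun p => p.1 == k)).map Prod.snd)) := by
  unfold transform_list_of_dicts
  simp only [stepA_eq_modify, ← List.foldl_flatten]
  have hnd := PySem.Dict.nodup_keys_foldl_modify_key data.flatten Prod.fst []
      (fun _ p => fun l => l ++ [p.2]) PySem.Dict.empty (by simp)
  rw [PySem.Dict.items_eq_map_keys _ hnd []]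
  rw [PySem.Dict.keys_foldl_modify_key data.flatten Prod.fst [] (fun _ p => fun l => l ++ [p.2])]
  apply List.map_congr_left
  intro k _
  rw [PySem.Dict.getD_foldl_modify_append]
  simp [PySem.Dict.getD_empty]

-- B's seen-set and key list stay equal as lists; the scan computes Set.update on both.
lemma keyfold (l : List (String × String)) (s : List String) :
    l.foldl (fun (st : PySem.Set String × List String) kv =>
        if PySem.Set.contains st.1 kv.1 then st
        else (PySem.Set.add st.1 kv.1, st.2 ++ [kv.1])) (s, s)
      = (PySem.Set.update s (l.map Prod.fst), PySem.Set.update s (l.map Prod.fst)) := by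
  induction l generalizing s with
  | nil => simp [PySem.Set.update]
  | cons p l ih =>
    rw [List.foldl_cons]
    have hadd : ∀ t, PySem.Set.update s (p.1 :: t) = PySem.Set.update (PySem.Set.add s p.1) t := fun _ => rfl
    by_cases h : PySem.Set.contains s p.1
    · have ha : PySem.Set.add s p.1 = s := by simp [PySem.Set.add]; simpa [PySem.Set.contains] using h
      rw [List.map_cons, hadd, ha, if_pos h]
      exact ih s
    · have ha : PySem.Set.add s p.1 = s ++ [p.1] := by
        simp [PySem.Set.add]; intro hm; exact absurd (by simpa [PySem.Set.contains] using hm) h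
      rw [List.map_cons, hadd, ha, if_neg h]
      exact ih (s ++ [p.1])

-- B's key scan produces the ordered dedup of all keys.
lemma portB_keys (data : List (List (String × String))) :
    (data.foldl (fun (st : PySem.Set String × List String) entry =>
      entry.foldl (fun st kv =>
        if PySem.Set.contains st.1 kv.1 then st
        else (PySem.Set.add st.1 kv.1, st.2 ++ [kv.1])) st) (PySem.Set.empty, [])).2 =
    PySem.List.dedup (data.flatten.map Prod.fst) := by
  rw [← List.foldl_flatten]
  have h0 : ((PySem.Set.empty : PySem.Set String), ([] : List String)) = (([] : List String), ([] : List String)) := rfl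
  rw [h0, keyfold]; rfl

-- per entry (unique keys): the dict lookup yields exactly the matching values.
lemma entry_lookup (e : List (String × String)) (k : String) (h : (e.map Prod.fst).Nodup) :
    ((PySem.Dict.mk e).get? k).toList = (e.filter (fun p => p.1 == k)).map Prod.snd := by
  induction e with
  | nil => simp [PySem.Dict.get?]
  | cons p rest ih =>
    simp only [List.map_cons, List.nodup_cons] at h
    by_cases hk : p.1 == k
    · have hnil : rest.filter (fun q => q.1 == k) = [] := by
        apply List.filter_eq_nil_iff.mpr
        intro q hq hqk
        exact h.1 (List.mem_map.mpr ⟨q, hq, (eq_of_beq hqk).trans (eq_of_beq hk).symm⟩)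
      simp [PySem.Dict.get?, hk, hnil]
    · simp only [PySem.Dict.get?] at ih ⊢
      simp [hk, ih h.2]

-- B's per-key rescan equals the filter of the flattened item stream.
lemma portB_values (data : List (List (String × String))) (k : String)
    (h : ∀ e ∈ data, (e.map Prod.fst).Nodup) :
    data.filterMap (fun entry => (PySem.Dict.mk entry).get? k) =
      (data.flatten.filter (fun p => p.1 == k)).map Prod.snd := by
  induction data with
  | nil => simp
  | cons e rest ih =>
    rw [List.filterMap_cons, List.flatten_cons, List.filter_append, List.map_append,
        ← ih (fun e he => h e (List.mem_cons_of_mem _ he)), ← entry_lookup e k (h e (List.mem_cons_self))]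
    cases (PySem.Dict.mk e).get? k <;> simp

-- ===== VERDICT (by name: the statement is the Claim_ definition above) =====
theorem transform_list_of_dicts_spec : Claim_equal_transform_list_of_dicts := by
  intro data _ hpre
  unfold Spec_transform_list_of_dicts transform_list_of_dicts_alt
  dsimp only
  rw [portA_eq, portB_keys]
  exact List.map_congr_left (fun k _ => by rw [portB_values data k hpre])
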